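-- pv_equiv track=rewrite | github.com/atrudel/code_synthesis | random_king_of_hill.py | decide_winner
-- ===== SOURCE A (Python) =====
-- def decide_winner(game_result):
--     ones = 0
--     twos = 0
--     winner = 1
--
--     for i in game_result:
--         if i == 1:
--             ones += 1
--         elif i == 2:
--             twos += 1
--
--     if twos > ones:
--         winner = 2
--     return winner
-- ===== SOURCE B (Python) =====
-- def decide_winner(game_result):
--     # Sort the valid votes; in the sorted [1,...,1,2,...,2] list the lower-median
--     # element is 2 exactly when the 2s strictly outnumber the 1s.
--     votes = sorted(v for v in game_result if v in (1, 2))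
--     if not votes:
--         return 1
--     return votes[(len(votes) - 1) // 2]
-- ===== Notes on version B (the rewrite author's own statement) =====
-- stated objective: alternative
-- what changed: Replaced the counting loop with order-statistic selection: filter the valid votes, sort them, and return the lower-median element of the sorted list (2 exactly when 2s strictly outnumber 1s), defaulting to 1 on no votes.
import Mathlib
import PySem

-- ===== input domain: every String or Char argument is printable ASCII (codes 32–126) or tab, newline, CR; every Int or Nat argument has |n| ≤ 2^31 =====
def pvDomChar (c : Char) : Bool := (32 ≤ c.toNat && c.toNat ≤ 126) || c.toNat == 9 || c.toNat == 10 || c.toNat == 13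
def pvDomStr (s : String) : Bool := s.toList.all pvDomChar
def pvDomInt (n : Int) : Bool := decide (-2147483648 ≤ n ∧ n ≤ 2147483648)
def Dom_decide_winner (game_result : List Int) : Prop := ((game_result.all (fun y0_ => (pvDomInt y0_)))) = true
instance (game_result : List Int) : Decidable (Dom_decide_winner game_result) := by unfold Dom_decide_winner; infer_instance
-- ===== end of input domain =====

-- B replaces the counting loop by order-statistic selection: sort the valid votes and
-- return the lower-median element (alternative decomposition; same result).

-- ===== PORT A =====
def decide_winner (game_result : List Int) : Int :=
  let st := game_result.foldl
    (fun (acc : Int × Int) i =>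
      if i = 1 then (acc.1 + 1, acc.2)
      else if i = 2 then (acc.1, acc.2 + 1)
      else acc) (0, 0)
  if st.2 > st.1 then 2 else 1

-- ===== PORT B =====
def decide_winner_alt (game_result : List Int) : Int :=
  let votes := PySem.List.sorted (game_result.filter (fun v => v == 1 || v == 2)) (fun x => x) false
  if votes = [] then 1
  else votes.getD ((votes.length - 1) / 2) 0

-- ===== PRECONDITION & SPEC =====
def Spec_decide_winner (game_result : List Int) (out : Int) : Prop := out = decide_winner_alt game_result
instance (game_result : List Int) (out : Int) : Decidable (Spec_decide_winner game_result out) := by unfold Spec_decide_winner; infer_instance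

-- ===== CLAIM (what is proved, stated in full; the proofs are below) =====
def Claim_equal_decide_winner : Prop := ∀ (game_result : List Int), Dom_decide_winner game_result → Spec_decide_winner game_result (decide_winner game_result)

-- ===== LEMMAS AND PROOFS =====

-- A's loop computes the two tallies.
lemma fold_eq_counts (l : List Int) (a b : Int) :
    l.foldl (fun (acc : Int × Int) i =>
      if i = 1 then (acc.1 + 1, acc.2)
      else if i = 2 then (acc.1, acc.2 + 1)
      else acc) (a, b)
    = (a + (l.count 1 : Int), b + (l.count 2 : Int)) := by
  induction l generalizing a b with
  | nil => simp
  | cons x xs ih =>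
    simp only [List.foldl_cons]
    split_ifs with h1 h2 <;>
      simp_all <;> ring_nf

-- a list whose elements are all 1 or 2 is a permutation of its counts' replicates
lemma perm_replicates (ys : List Int) (h : ∀ x ∈ ys, x = 1 ∨ x = 2) :
    ys.Perm (List.replicate (ys.count 1) 1 ++ List.replicate (ys.count 2) 2) := by
  induction ys with
  | nil => simp
  | cons x xs ih =>
    have hx := h x (by simp)
    have hxs := ih (fun y hy => h y (by simp [hy]))
    rcases hx with hx | hx
    · subst hx
      simpa [List.count_cons, List.replicate_succ] using hxs.cons 1
    · subst hx
      have : (2 :: xs).Perm (2 :: (List.replicate (xs.count 1) 1 ++ List.replicate (xs.count 2) 2)) :=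
        hxs.cons 2
      refine this.trans ?_
      simp only [List.count_cons]
      have := (List.perm_middle (a := (2:Int)) (l₁ := List.replicate (xs.count 1) (1:Int))
        (l₂ := List.replicate (xs.count 2) (2:Int))).symm
      simpa using this

lemma sorted_filter_eq (l : List Int) :
    PySem.List.sorted (l.filter (fun v => v == 1 || v == 2)) (fun x => x) false
      = List.replicate (l.count 1) 1 ++ List.replicate (l.count 2) 2 := by
  have hmem : ∀ x ∈ l.filter (fun v => v == 1 || v == 2), x = 1 ∨ x = 2 := by
    intro x hx
    have := List.of_mem_filter hx
    simpa using this
  have hc1 : (l.filter (fun v => v == 1 || v == 2)).count 1 = l.count 1 := by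
    simp [List.count_filter]
  have hc2 : (l.filter (fun v => v == 1 || v == 2)).count 2 = l.count 2 := by
    simp [List.count_filter]
  have hperm := perm_replicates _ hmem
  rw [hc1, hc2] at hperm
  refine PySem.List.sorted_id_eq_of_perm_of_pairwise _ _ hperm.symm ?_
  refine List.pairwise_append.2 ⟨?_, ?_, ?_⟩
  · exact List.pairwise_replicate.2 (Or.inr le_rfl)
  · exact List.pairwise_replicate.2 (Or.inr le_rfl)
  · intro a ha b hb
    have := List.eq_of_mem_replicate ha
    have := List.eq_of_mem_replicate hb
    omega

lemma getD_replicates (o t m : Nat) (hm : m < o + t) :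
    ((List.replicate o (1:Int)) ++ List.replicate t 2).getD m 0
      = if m < o then 1 else 2 := by
  have hlen : ((List.replicate o (1:Int)) ++ List.replicate t 2).length = o + t := by simp
  rw [List.getD_eq_getElem _ _ (by omega)]
  by_cases h : m < o
  · rw [List.getElem_append_left (by simpa using h)]
    simp [h]
  · rw [List.getElem_append_right (by simpa using h)]
    simp [h, List.getElem_replicate]

-- ===== VERDICT (by name: the statement is the Claim_ definition above) =====
theorem decide_winner_spec : Claim_equal_decide_winner := by
  intro l _
  unfold Spec_decide_winner decide_winner decide_winner_alt
  rw [fold_eq_counts, sorted_filter_eq]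
  set o := l.count 1 with ho
  set t := l.count 2 with ht
  simp only [zero_add]
  by_cases hnil : (List.replicate o (1:Int)) ++ List.replicate t 2 = []
  · have h0 : o = 0 ∧ t = 0 := by
      simpa [List.append_eq_nil_iff, List.replicate_eq_nil_iff] using hnil
    simp [h0.1, h0.2]
  · have hlen : ((List.replicate o (1:Int)) ++ List.replicate t 2).length = o + t := by simp
    have hpos : 0 < o + t := by
      rcases Nat.eq_zero_or_pos (o + t) with h | h
      · exfalso; apply hnil
        have : o = 0 ∧ t = 0 := by omega
        simp [this.1, this.2]
      · exact h
    rw [if_neg hnil, hlen]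
    rw [getD_replicates o t ((o + t - 1) / 2) (by omega)]
    by_cases hlt : (o + t - 1) / 2 < o
    · rw [if_pos hlt, if_neg (by omega)]
    · rw [if_neg hlt, if_pos (by omega)]
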